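/- GENERATED by mk_final_copies.py from the proof of the farm's unit `inverse_mdct.11` (farm:inverse_mdct.11.1: Lemmas.lean) as the
   re-elaboration sweep compiled it — do not edit. -/
import Asan.CheckWalk
import Vorbis.Spec.MdctUse
import Vorbis.Spec.Units.inverse_mdct_11

open X86 X86.User Asan Vorbis Vorbis.Spec

set_option maxRecDepth 4000
set_option maxHeartbeats 4000000

namespace Vorbis.Spec.inverse_mdct_11

/-- The windows one half of the step-8 body writes: the return address of the check calls `[rsp − 8]`, the float scratch slots
`[rbp − 58H]`, `[rbp − 50H]`, `[rbp − 44H]`, `[rbp − 40H]`, the slot `q[rbp − 38H]` (`d` bytes of it: 0 in the first half, 8 in the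
second, which increments `d0` in memory), and the sample buffer. `sp` = the stack pointer at the function's entry. -/
def halfWins (sp d b n : Nat) : List Span :=
  [⟨sp - 192, sp - 184⟩, ⟨sp - 96, sp - 84⟩, ⟨sp - 76, sp - 68⟩, ⟨sp - 64, sp - 64 + d⟩, ⟨b, b + 4 * n⟩]

/-- What the two walks need to know about the three arrays of step 8: they are live (in the live set with the temp block), and
where they lie, as arithmetic. -/
structure Arrays (others : List Obj) (frames : List (Nat × FrameLayout)) (A : Arena) (ue : State) : Prop where
  /-- the block size is a multiple of 64 in `[64, 8192]` -/
  nf : inverse_mdct.n ue % 64 = 0 ∧ 64 ≤ inverse_mdct.n ue ∧ inverse_mdct.n ue ≤ 8192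
  /-- the temp block `v` is live -/
  liveV : LiveBytes (A.newTempObj (2 * inverse_mdct.n ue) :: others) frames (inverse_mdct.tmp A ue) (2 * inverse_mdct.n ue)
  /-- the table `B` is live -/
  liveB : LiveBytes (A.newTempObj (2 * inverse_mdct.n ue) :: others) frames (inverse_mdct.tabB ue) (2 * inverse_mdct.n ue)
  /-- the `n` floats of the sample buffer are live -/
  liveU : LiveBytes (A.newTempObj (2 * inverse_mdct.n ue) :: others) frames (inverse_mdct.buf ue) (4 * inverse_mdct.n ue)
  /-- the sample buffer lies above the image's text -/
  loU : 0x119d40 ≤ inverse_mdct.buf ue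
  /-- … inside the data space -/
  hiU : inverse_mdct.buf ue + 4 * inverse_mdct.n ue ≤ 0xC00000
  /-- … off the stack region -/
  offU : inverse_mdct.buf ue + 4 * inverse_mdct.n ue ≤ 0x700000 ∨ 0x800000 ≤ inverse_mdct.buf ue
  /-- the temp block lies in the data space -/
  loV : 0x119d40 ≤ inverse_mdct.tmp A ue
  /-- the temp block lies in the data space -/
  hiV : inverse_mdct.tmp A ue + 2 * inverse_mdct.n ue ≤ 0xC00000
  /-- the table `B` lies in the data space -/
  loB : 0x119d40 ≤ inverse_mdct.tabB ue
  /-- the table `B` lies in the data space -/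
  hiB : inverse_mdct.tabB ue + 2 * inverse_mdct.n ue ≤ 0xC00000

/-- The facts about the three arrays, from the shared part of a cut-point assertion. -/
theorem arrays {u₀ : State} {others : List Obj} {frames : List (Nat × FrameLayout)} {len : Nat} {A : Arena}
    {stored room : Int} {ysz : Nat → Nat} {k c : Nat} {ue : State} {ret : Word} {v : State}
    (hb : inverse_mdct.Body u₀ others frames len A stored room ysz k c ue ret v) : Arrays others frames A ue := by
  have hp := hb.pre
  have he := hb.entry
  have hroom := he.room
  simp only [vspec, conv_stackLo] at hroom
  have hnf := hp.isBlocksize.facts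
  have hLv : LiveBytes (A.newTempObj (2 * inverse_mdct.n ue) :: others) frames (inverse_mdct.tmp A ue)
      (2 * inverse_mdct.n ue) :=
    inverse_mdct.tmp_live A ue
  have hLB : LiveBytes (A.newTempObj (2 * inverse_mdct.n ue) :: others) frames (inverse_mdct.tabB ue)
      (2 * inverse_mdct.n ue) :=
    LiveBytes.of_block (hp.blkLive (A.newTempObj (2 * inverse_mdct.n ue)) _ hp.tabB_blk) (Nat.le_refl _) (Nat.le_refl _)
  have hnle := hp.n_le
  have hLu : LiveBytes (A.newTempObj (2 * inverse_mdct.n ue) :: others) frames (inverse_mdct.buf ue)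
      (4 * inverse_mdct.n ue) := by
    refine LiveBytes.of_block (hp.blkLive (A.newTempObj (2 * inverse_mdct.n ue)) _ hp.buf_blk) (Nat.le_refl _) ?_
    show inverse_mdct.buf ue + 4 * inverse_mdct.n ue ≤ inverse_mdct.buf ue + 4 * bsize ue.mem (inverse_mdct.f ue) 1
    omega
  have hoff : ∀ o, o ∈ A.newTempObj (2 * inverse_mdct.n ue) :: others → L.textHi ≤ o.base := by
    intro o ho
    rcases List.mem_cons.mp ho with rfl | ho'
    · have := hp.arenaText
      show L.textHi ≤ A.B + (A.T - (r8 (2 * inverse_mdct.n ue) + 32))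
      omega
    · exact hp.shadow.offText o ho'
  have hwv := hLv.where_ hb.shadow hoff (by omega) (by omega)
  have hwB := hLB.where_ hb.shadow hoff (by omega) (by omega)
  have hwu := hLu.where_ hb.shadow hoff (by omega) (by omega)
  have hou : inverse_mdct.buf ue + 4 * inverse_mdct.n ue ≤ 0x700000 ∨ 0x800000 ≤ inverse_mdct.buf ue := by
    have := hp.offStack _ hp.buf_blk
    simp only [] at this
    omega
  exact ⟨hnf, hLv, hLB, hLu, hwu.1, hwu.2.1, hou, hwv.1, hwv.2.1, hwB.1, hwB.2.1⟩

/-- **The frame rule of one half of the step-8 body**: the shared part `Body` of the assertion at the end of a half, from the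
shared part at its beginning, when the half wrote only the windows `halfWins` (no permanent slot of the frame is among them); and
the slot `q[rbp − 38H]` reads as before when no byte of it was written (`d = 0`). -/
theorem carry_tight {u₀ : State} {others : List Obj} {frames : List (Nat × FrameLayout)} {len : Nat} {A : Arena}
    {stored room : Int} {ysz : Nat → Nat} {k c : Nat} {ue : State} {ret : Word} {v w : State} {d : Nat}
    (hb : inverse_mdct.Body u₀ others frames len A stored room ysz k c ue ret v) (hd : d ≤ 8)
    (hst : Mem.SameExcept (halfWins (ue.reg .rsp).toNat d (inverse_mdct.buf ue) (inverse_mdct.n ue)) v.mem w.mem)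
    (hcode : CodeOK u₀ w.mem) (habi : abiInv w)
    (hrbp : w.reg .rbp = ue.reg .rsp - 8) (hrsp : w.reg .rsp = ue.reg .rsp - 184) :
    inverse_mdct.Body u₀ others frames len A stored room ysz k c ue ret w ∧
      (d = 0 → w.mem.readLE (ue.reg .rsp - 64) 8 = v.mem.readLE (ue.reg .rsp - 64) 8) := by
  have har := arrays hb
  have hou := har.offU
  have he := hb.entry
  have hroom := he.room
  have htop := he.top
  simp only [vspec, conv_stackLo, conv_stackHi] at hroom htop
  -- a read of the frame off the windows
  have hread : ∀ (a : Word) (n : Nat), (ue.reg .rsp).toNat - 184 ≤ a.toNat → a.toNat + n ≤ (ue.reg .rsp).toNat + 8 →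
      (a.toNat + n ≤ (ue.reg .rsp).toNat - 96 ∨ (ue.reg .rsp).toNat - 84 ≤ a.toNat) →
      (a.toNat + n ≤ (ue.reg .rsp).toNat - 76 ∨ (ue.reg .rsp).toNat - 68 ≤ a.toNat) →
      (a.toNat + n ≤ (ue.reg .rsp).toNat - 64 ∨ (ue.reg .rsp).toNat - 64 + d ≤ a.toNat) →
      w.mem.readLE a n = v.mem.readLE a n := by
    intro a n h1 h2 h3 h4 h5
    refine hst.readLE a n (by omega) ?_
    intro x hx
    simp only [halfWins, List.mem_cons, List.mem_nil_iff, or_false] at hx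
    rcases hx with rfl | rfl | rfl | rfl | rfl <;> simp only [] <;> omega
  refine ⟨?_, ?_⟩
  · refine hb.carry ?_ hcode habi hrbp hrsp ?_ ?_ ?_ ?_ ?_ ?_ ?_ ?_ ?_ ?_ ?_
    · apply hst.mono
      intro x hx a ha1 ha2
      simp only [halfWins, List.mem_cons, List.mem_nil_iff, or_false] at hx
      rcases hx with rfl | rfl | rfl | rfl | rfl <;> simp only [] at ha1 ha2
      · exact ⟨_, List.mem_cons_self, by simp only []; omega, by simp only []; omega⟩
      · exact ⟨_, List.mem_cons_self, by simp only []; omega, by simp only []; omega⟩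
      · exact ⟨_, List.mem_cons_self, by simp only []; omega, by simp only []; omega⟩
      · exact ⟨_, List.mem_cons_self, by simp only []; omega, by simp only []; omega⟩
      · exact ⟨_, List.mem_cons_of_mem _ List.mem_cons_self, ha1, ha2⟩
    · rw [hread _ 8 (by u_omega) (by u_omega) (by u_omega) (by u_omega) (by u_omega)]
      exact hb.retSlot
    · rw [hread _ 8 (by u_omega) (by u_omega) (by u_omega) (by u_omega) (by u_omega)]
      exact hb.rbpSlot
    · rw [hread _ 8 (by u_omega) (by u_omega) (by u_omega) (by u_omega) (by u_omega)]
      exact hb.r15Slot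
    · rw [hread _ 8 (by u_omega) (by u_omega) (by u_omega) (by u_omega) (by u_omega)]
      exact hb.r14Slot
    · rw [hread _ 8 (by u_omega) (by u_omega) (by u_omega) (by u_omega) (by u_omega)]
      exact hb.r13Slot
    · rw [hread _ 8 (by u_omega) (by u_omega) (by u_omega) (by u_omega) (by u_omega)]
      exact hb.r12Slot
    · rw [hread _ 8 (by u_omega) (by u_omega) (by u_omega) (by u_omega) (by u_omega)]
      exact hb.rbxSlot
    · rw [hread _ 8 (by u_omega) (by u_omega) (by u_omega) (by u_omega) (by u_omega)]
      exact hb.fSlot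
    · rw [hread _ 4 (by u_omega) (by u_omega) (by u_omega) (by u_omega) (by u_omega)]
      exact hb.btSlot
    · rw [hread _ 4 (by u_omega) (by u_omega) (by u_omega) (by u_omega) (by u_omega)]
      exact hb.saveSlot
    · rw [hread _ 8 (by u_omega) (by u_omega) (by u_omega) (by u_omega) (by u_omega)]
      exact hb.vSlot
  · intro hd0
    subst hd0
    exact hread _ 8 (by u_omega) (by u_omega) (by u_omega) (by u_omega) (by u_omega)

/-- **In the middle of the second half of the step-8 body**, at the check call `chk93` of line 2937 (`p1 = e[0]*B[1] − e[1]*B[0]`):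
lines 2929–2935 are done, no scratch slot is live, the pointers have not moved: the invariant of the loop and `t < n16`, as at
`cut23`, and the argument of the check call, `rdi = rbx = e` (set by `mov rdi, rbx` at 0x10a059). The unit is walked in two halves (each with its own frame rule `carry_tight`): the walker's context stays small. -/
def AtHalf (u₀ : State) (others : List Obj) (frames : List (Nat × FrameLayout)) (len : Nat) (A : Arena)
    (stored room : Int) (ysz : Nat → Nat) (k c : Nat) (ue : State) (ret : Word) (t : Nat) (w : State) : Prop :=
  w.rip = Vorbis.L.inverse_mdct.chk93 ∧ inverse_mdct.S8Loop u₀ others frames len A stored room ysz k c ue ret t w ∧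
    t < inverse_mdct.n ue / 16 ∧ w.reg .rdi = w.reg .rbx

/-- **The first half** (`cut23` = 0x109f5f … `chk93` = 0x10a05c, lines 2929–2935): four loads of `e[2] B[3] e[3] B[2]`, four stores
`d0[2] d1[1] d2[2] d3[1]`, eight checks. The walk is cut after every check call (`ret96` … `ret103`) to drop the walker's `w_zmm`
(it starts tracking the vector registers after a check call, and the term doubles with every SSE instruction). -/
theorem first_half {Lay : Layout} (hLay : Lay.hi = 0x1000000) {μ : Microarch} (hμ : UserX.MicroOK μ) {u₀ : State}
    (hcode : HasCodeNat Lay u₀ Vorbis.L.inverse_mdct.entry Vorbis.Code.code_inverse_mdct.nat Vorbis.L.inverse_mdct.size)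
    (hload4 : Asan.SmallCheck Lay μ Vorbis.WayInv (Vorbis.CodeOK u₀) [.rax, .rcx, .rdx] 4 Vorbis.L.__asan_load4_noabort.entry)
    (hstore4 : Asan.SmallCheck Lay μ Vorbis.WayInv (Vorbis.CodeOK u₀) [.rax, .rcx, .rdx] 4 Vorbis.L.__asan_store4_noabort.entry)
    {others : List Obj} {frames : List (Nat × FrameLayout)} {len : Nat} {A : Arena} {stored room : Int} {ysz : Nat → Nat}
    {k c : Nat} {ue : State} {ret : Word} {t : Nat} {v : State}
    (hat : inverse_mdct.AtS8Mid u₀ others frames len A stored room ysz k c ue ret t v) :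
    ReachVia Lay μ WayInv v (fun w => AtHalf u₀ others frames len A stored room ysz k c ue ret t w) := by
  obtain ⟨hrip, hl, hlt⟩ := hat
  have hb := hl.body
  have he := hb.entry
  v_entry he
  have har := arrays hb
  have hnf := har.nf
  have hbu := har.loU
  have hcu := har.hiU
  have hou := har.offU
  have hbv := har.loV
  have hcv := har.hiV
  have hbB := har.loB
  have hcB := har.hiB
  -- the present state under the names the walker reads
  have w_rip := hrip
  have c_rsp := hb.rsp
  have c_rbp := hb.rbp
  have w_eq : Mem.EqOn Vorbis.L.textLo Vorbis.L.textHi u₀.mem v.mem := hb.code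
  have hdf : v.flags .df = false := (show abiInv _ from hb.abi).1
  have hmx : v.mxcsr &&& 0x1F80 = 0x1F80 := (show abiInv _ from hb.abi).2
  have hsse := Vorbis.sseOK_of_abiInv hb.abi
  have sd0 := hl.d0Slot
  have hrbx := hl.rbx
  have hr12 := hl.r12
  have hr13 := hl.r13
  have hr14 := hl.r14
  have hr15 := hl.r15
  u_walk hcode [hμ.vendor] until [Vorbis.L.inverse_mdct.ret96] span [Vorbis.L.textLo, Vorbis.L.textHi] side (v_side)
  case check_109f63 =>
    have hun : ShadowUntouched v.mem s_109f63.mem := by v_untouched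
    exact har.liveV.accSmall hb.shadow hun _ 4 (by decide) (by u_omega) (by u_omega)
  try clear w_zmm
  u_walk hcode [hμ.vendor] until [Vorbis.L.inverse_mdct.ret97] span [Vorbis.L.textLo, Vorbis.L.textHi] side (v_side)
  case check_109f77 =>
    have hun : ShadowUntouched v.mem s_109f77.mem := by v_untouched
    exact har.liveB.accSmall hb.shadow hun _ 4 (by decide) (by u_omega) (by u_omega)
  try clear w_zmm
  u_walk hcode [hμ.vendor] until [Vorbis.L.inverse_mdct.ret98] span [Vorbis.L.textLo, Vorbis.L.textHi] side (v_side)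
  case check_109f9a =>
    have hun : ShadowUntouched v.mem s_109f9a.mem := by v_untouched
    exact har.liveV.accSmall hb.shadow hun _ 4 (by decide) (by u_omega) (by u_omega)
  try clear w_zmm
  u_walk hcode [hμ.vendor] until [Vorbis.L.inverse_mdct.ret99] span [Vorbis.L.textLo, Vorbis.L.textHi] side (v_side)
  case check_109fae =>
    have hun : ShadowUntouched v.mem s_109fae.mem := by v_untouched
    exact har.liveB.accSmall hb.shadow hun _ 4 (by decide) (by u_omega) (by u_omega)
  try clear w_zmm
  u_walk hcode [hμ.vendor] until [Vorbis.L.inverse_mdct.ret100] span [Vorbis.L.textLo, Vorbis.L.textHi] side (v_side)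
  case check_109ffe =>
    have hun : ShadowUntouched v.mem s_109ffe.mem := by v_untouched
    exact har.liveU.accSmall hb.shadow hun _ 4 (by decide) (by u_omega) (by u_omega)
  try clear w_zmm
  u_walk hcode [hμ.vendor] until [Vorbis.L.inverse_mdct.ret101] span [Vorbis.L.textLo, Vorbis.L.textHi] side (v_side)
  case check_10a021 =>
    have hun : ShadowUntouched v.mem s_10a021.mem := by v_untouched
    exact har.liveU.accSmall hb.shadow hun _ 4 (by decide) (by u_omega) (by u_omega)
  try clear w_zmm
  u_walk hcode [hμ.vendor] until [Vorbis.L.inverse_mdct.ret102] span [Vorbis.L.textLo, Vorbis.L.textHi] side (v_side)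
  case check_10a035 =>
    have hun : ShadowUntouched v.mem s_10a035.mem := by v_untouched
    exact har.liveU.accSmall hb.shadow hun _ 4 (by decide) (by u_omega) (by u_omega)
  try clear w_zmm
  u_walk hcode [hμ.vendor] until [Vorbis.L.inverse_mdct.ret103] span [Vorbis.L.textLo, Vorbis.L.textHi] side (v_side)
  case check_10a049 =>
    have hun : ShadowUntouched v.mem s_10a049.mem := by v_untouched
    exact har.liveU.accSmall hb.shadow hun _ 4 (by decide) (by u_omega) (by u_omega)
  try clear w_zmm
  u_walk hcode [hμ.vendor] until [Vorbis.L.inverse_mdct.chk93] span [Vorbis.L.textLo, Vorbis.L.textHi] side (v_side)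
  -- 0x10a05c: the exit assertion
  have hst : Mem.SameExcept [⟨(ue.reg .rsp).toNat - 192, (ue.reg .rsp).toNat - 184⟩,
      ⟨(ue.reg .rsp).toNat - 96, (ue.reg .rsp).toNat - 84⟩, ⟨(ue.reg .rsp).toNat - 76, (ue.reg .rsp).toNat - 68⟩,
      ⟨(ue.reg .rsp).toNat - 64, (ue.reg .rsp).toNat - 64 + 0⟩,
      ⟨inverse_mdct.buf ue, inverse_mdct.buf ue + 4 * inverse_mdct.n ue⟩] v.mem s_10a059.mem := by
    u_same
  have habi : abiInv s_10a059 := by v_inv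
  have hrbp' : s_10a059.reg .rbp = ue.reg .rsp - 8 := by
    rw [w_kept .rbp rfl]
    exact c_rbp
  obtain ⟨hbody, hd0⟩ := carry_tight hb (Nat.zero_le 8) hst w_eq habi hrbp' w_rsp
  refine ReachVia.done ⟨w_rip, ⟨hbody, hl.le, ?_, ?_, ?_, ?_, ?_, ?_⟩, hlt, ?_⟩
  · rw [w_kept .rbx rfl]
    exact hrbx
  · rw [w_kept .r12 rfl]
    exact hr12
  · rw [hd0 rfl]
    exact sd0
  · rw [w_kept .r13 rfl]
    exact hr13
  · rw [w_kept .r15 rfl]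
    exact hr15
  · rw [w_kept .r14 rfl]
    exact hr14
  · rw [w_rdi, w_kept .rbx rfl]

end Vorbis.Spec.inverse_mdct_11
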